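-- pv_equiv track=rewrite | github.com/ZWSeanMa/python-data-scraper-for-level | utils/scraper_utils.py | is_australian_job
-- ===== SOURCE A (Python) =====
-- from typing import List, Dict, Optional
--
-- def is_australian_job(job_data: Dict) -> bool:
--     """判断是否为澳洲职位"""
--     if not job_data:
--         return False
--
--     text_to_check = f"{job_data.get('company_name', '')} {job_data.get('location', '')} {job_data.get('description', '')}".lower()
--
--     australian_keywords = [
--         'australia', 'australian', 'sydney', 'melbourne', 'brisbane',
--         'perth', 'adelaide', 'canberra', 'darwin', 'hobart',
--         'nsw', 'vic', 'qld', 'wa', 'sa', 'tas', 'nt', 'act',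
--         'australia', 'australian', 'sydney', 'melbourne', 'brisbane',
--         'perth', 'adelaide', 'canberra', 'darwin', 'hobart',
--         'nsw', 'vic', 'qld', 'wa', 'sa', 'tas', 'nt', 'act'
--     ]
--
--     return any(keyword in text_to_check for keyword in australian_keywords)
-- ===== SOURCE B (Python) =====
-- _AUS_KEYWORDS = (
--     'australia', 'australian', 'sydney', 'melbourne', 'brisbane',
--     'perth', 'adelaide', 'canberra', 'darwin', 'hobart',
--     'nsw', 'vic', 'qld', 'wa', 'sa', 'tas', 'nt', 'act'
-- )
--
-- def is_australian_job(job_data):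
--     """判断是否为澳洲职位 — position-major single left-to-right scan of the text."""
--     if not job_data:
--         return False
--     text_to_check = f"{job_data.get('company_name', '')} {job_data.get('location', '')} {job_data.get('description', '')}".lower()
--     for i in range(len(text_to_check)):
--         if text_to_check.startswith(_AUS_KEYWORDS, i):
--             return True
--     return False
-- ===== Notes on version B (the rewrite author's own statement) =====
-- stated objective: alternative
-- what changed: Replaces the keyword-major loop (one full substring search of the text per keyword, over a list that repeats all 18 keywords twice) by a position-major single left-to-right scan of the text that tests all keywords at each position via str.startswith with a tuple and a start index.
import Mathlib
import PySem

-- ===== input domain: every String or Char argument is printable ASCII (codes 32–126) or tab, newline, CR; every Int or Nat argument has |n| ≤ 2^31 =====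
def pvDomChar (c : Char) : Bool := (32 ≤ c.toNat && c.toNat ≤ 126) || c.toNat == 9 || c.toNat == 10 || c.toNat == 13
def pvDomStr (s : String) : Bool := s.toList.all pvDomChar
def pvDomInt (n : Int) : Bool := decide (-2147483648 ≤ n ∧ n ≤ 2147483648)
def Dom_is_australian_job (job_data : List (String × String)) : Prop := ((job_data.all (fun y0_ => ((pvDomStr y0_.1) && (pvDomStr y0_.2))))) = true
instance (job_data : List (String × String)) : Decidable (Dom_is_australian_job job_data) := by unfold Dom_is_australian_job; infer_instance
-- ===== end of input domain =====

-- B replaces the keyword-major `any(kw in text …)` loop by a position-major single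
-- left-to-right scan of the text checking all keywords at each position (objective: alternative).

-- ===== PORT A =====
-- A's keyword list, literally (it repeats the 18 keywords twice)
def ausKw36 : List (List Char) :=
  ["australia".toList, "australian".toList, "sydney".toList, "melbourne".toList, "brisbane".toList,
   "perth".toList, "adelaide".toList, "canberra".toList, "darwin".toList, "hobart".toList,
   "nsw".toList, "vic".toList, "qld".toList, "wa".toList, "sa".toList, "tas".toList, "nt".toList, "act".toList,
   "australia".toList, "australian".toList, "sydney".toList, "melbourne".toList, "brisbane".toList,
   "perth".toList, "adelaide".toList, "canberra".toList, "darwin".toList, "hobart".toList,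
   "nsw".toList, "vic".toList, "qld".toList, "wa".toList, "sa".toList, "tas".toList, "nt".toList, "act".toList]

-- f"{get('company_name','')} {get('location','')} {get('description','')}".lower(), on char lists
def pvBuildText (job_data : List (String × String)) : List Char :=
  let d := PySem.Dict.mk job_data
  PySem.Chars.lower
    ((d.getD "company_name" "").toList ++ ' ' ::
     (d.getD "location" "").toList ++ ' ' ::
     (d.getD "description" "").toList)

def is_australian_job (job_data : List (String × String)) : Bool :=
  if job_data.isEmpty then false
  else
    let text_to_check := pvBuildText job_data
    ausKw36.any (fun kw => PySem.Chars.isIn kw text_to_check)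

-- ===== PORT B =====
def ausKw18 : List (List Char) :=
  ["australia".toList, "australian".toList, "sydney".toList, "melbourne".toList, "brisbane".toList,
   "perth".toList, "adelaide".toList, "canberra".toList, "darwin".toList, "hobart".toList,
   "nsw".toList, "vic".toList, "qld".toList, "wa".toList, "sa".toList, "tas".toList, "nt".toList, "act".toList]

-- the position loop: at each position i (each suffix), text.startswith(keywords, i)
def pvScanPos (kws : List (List Char)) : List Char → Bool
  | [] => false
  | c :: rest => kws.any (fun kw => PySem.Chars.startswith (c :: rest) kw) || pvScanPos kws rest

def is_australian_job_alt (job_data : List (String × String)) : Bool :=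
  if job_data.isEmpty then false
  else
    let text_to_check := pvBuildText job_data
    pvScanPos ausKw18 text_to_check

-- ===== PRECONDITION & SPEC =====
def Spec_is_australian_job (job_data : List (String × String)) (out : Bool) : Prop := out = is_australian_job_alt job_data
instance (job_data : List (String × String)) (out : Bool) : Decidable (Spec_is_australian_job job_data out) := by unfold Spec_is_australian_job; infer_instance

-- ===== CLAIM (what is proved, stated in full; the proofs are below) =====
def Claim_equal_is_australian_job : Prop := ∀ (job_data : List (String × String)), Dom_is_australian_job job_data → Spec_is_australian_job job_data (is_australian_job job_data)

-- ===== LEMMAS AND PROOFS =====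

-- the position-major scan finds exactly the keywords occurring as infixes (keywords nonempty)
theorem pvScanPos_iff (kws : List (List Char)) (h : ∀ k ∈ kws, k ≠ []) :
    ∀ cs : List Char, pvScanPos kws cs = true ↔ ∃ k ∈ kws, k <:+: cs := by
  intro cs
  induction cs with
  | nil =>
      simp only [pvScanPos, Bool.false_eq_true, false_iff]
      rintro ⟨k, hk, hinf⟩
      exact h k hk (List.eq_nil_of_infix_nil hinf)
  | cons c rest ih =>
      simp only [pvScanPos, Bool.or_eq_true, List.any_eq_true, ih]
      constructor
      · rintro (⟨k, hk, hs⟩ | ⟨k, hk, hinf⟩)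
        · exact ⟨k, hk, ((PySem.Chars.startswith_iff _ _).1 hs).isInfix⟩
        · exact ⟨k, hk, hinf.trans (List.suffix_cons c rest).isInfix⟩
      · rintro ⟨k, hk, hinf⟩
        rcases List.infix_cons_iff.1 hinf with hp | hi
        · exact Or.inl ⟨k, hk, (PySem.Chars.startswith_iff _ _).2 hp⟩
        · exact Or.inr ⟨k, hk, hi⟩

theorem ausKw36_eq : ausKw36 = ausKw18 ++ ausKw18 := by decide

theorem pvMain (cs : List Char) :
    ausKw36.any (fun kw => PySem.Chars.isIn kw cs) = pvScanPos ausKw18 cs := by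
  rw [Bool.eq_iff_iff, pvScanPos_iff ausKw18 (by decide) cs]
  simp only [List.any_eq_true, PySem.Chars.isIn_iff_infix, ausKw36_eq, List.mem_append, or_self]

-- ===== VERDICT (by name: the statement is the Claim_ definition above) =====
theorem is_australian_job_spec : Claim_equal_is_australian_job := by
  intro job_data _
  unfold Spec_is_australian_job is_australian_job is_australian_job_alt
  cases h : job_data.isEmpty with
  | true => simp
  | false => simp [pvMain]
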